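-- pv_equiv track=rewrite | github.com/Layla7120/think_python | chapter9/9-5.py | uses_all
-- ===== SOURCE A (Python) =====
-- def uses_all(a, words):
--     count = 0
--     for letter in a:
--         if letter in words:
--             count += 1
--     if count >= 1:
--         return True
--     else:
--         return False
-- ===== SOURCE B (Python) =====
-- def uses_all(a, words):
--     return bool(set(a) & set(words))
-- ===== Notes on version B (the rewrite author's own statement) =====
-- stated objective: faster
-- what changed: Replaces the explicit per-character loop with a counter and threshold test (each iteration scanning words for membership) by a single set-intersection non-emptiness test.
import Mathlib
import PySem

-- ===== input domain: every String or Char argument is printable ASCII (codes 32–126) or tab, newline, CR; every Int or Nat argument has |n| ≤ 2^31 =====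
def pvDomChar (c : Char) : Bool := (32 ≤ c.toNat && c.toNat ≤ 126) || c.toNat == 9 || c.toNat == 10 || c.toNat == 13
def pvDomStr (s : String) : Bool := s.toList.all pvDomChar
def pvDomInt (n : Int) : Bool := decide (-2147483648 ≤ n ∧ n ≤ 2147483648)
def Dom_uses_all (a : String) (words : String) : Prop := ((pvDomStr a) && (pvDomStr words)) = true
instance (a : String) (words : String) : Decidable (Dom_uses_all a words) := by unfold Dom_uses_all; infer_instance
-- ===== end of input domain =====

-- B replaces A's per-character scan with a counter by a single set-intersection non-emptiness test (simpler).


-- ===== PORT A =====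
-- 'letter in words' on a single character is membership of that char in words.
def uses_all (a : String) (words : String) : Bool :=
  let count : Int :=
    a.toList.foldl (fun count letter =>
      if words.toList.contains letter then count + 1 else count) 0
  if count ≥ 1 then true else false

-- ===== PORT B =====
def uses_all_alt (a : String) (words : String) : Bool :=
  !(PySem.Set.inter (PySem.Set.ofList a.toList) (PySem.Set.ofList words.toList)).isEmpty

-- ===== PRECONDITION & SPEC =====
def Spec_uses_all (a : String) (words : String) (out : Bool) : Prop := out = uses_all_alt a words
instance (a : String) (words : String) (out : Bool) : Decidable (Spec_uses_all a words out) := by unfold Spec_uses_all; infer_instance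

-- ===== CLAIM (what is proved, stated in full; the proofs are below) =====
def Claim_equal_uses_all : Prop := ∀ (a : String) (words : String), Dom_uses_all a words → Spec_uses_all a words (uses_all a words)

-- ===== LEMMAS AND PROOFS =====
theorem uses_all_count (l w : List Char) (c : Int) :
    l.foldl (fun count letter => if w.contains letter then count + 1 else count) c
      = c + (l.countP (fun x => w.contains x) : Int) := by
  induction l generalizing c with
  | nil => simp
  | cons x xs ih =>
    rw [List.foldl_cons, List.countP_cons, ih]
    by_cases h : w.contains x = true
    · rw [if_pos h, if_pos h]; push_cast; ring
    · rw [if_neg h, if_neg h]; push_cast; ring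

theorem uses_all_eq_any (a words : String) :
    uses_all a words = a.toList.any (fun x => words.toList.contains x) := by
  unfold uses_all
  rw [uses_all_count]
  dsimp only
  split_ifs with hge
  · symm
    rw [List.any_eq_true]
    have h1 : (1 : Int) ≤ (a.toList.countP (fun x => words.toList.contains x) : Int) := by
      linarith [hge]
    have hpos : 0 < a.toList.countP (fun x => words.toList.contains x) := by
      exact_mod_cast lt_of_lt_of_le zero_lt_one h1
    obtain ⟨x, hx, hw⟩ := List.countP_pos_iff.mp hpos
    exact ⟨x, hx, hw⟩
  · symm
    rw [List.any_eq_false]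
    intro x hx hc
    apply hge
    have hpos : 0 < a.toList.countP (fun x => words.toList.contains x) :=
      List.countP_pos_iff.mpr ⟨x, hx, hc⟩
    have h1 : (1 : Int) ≤ (a.toList.countP (fun x => words.toList.contains x) : Int) := by
      exact_mod_cast hpos
    linarith

theorem uses_all_alt_eq_any (a words : String) :
    uses_all_alt a words = a.toList.any (fun x => words.toList.contains x) := by
  rw [Bool.eq_iff_iff]
  unfold uses_all_alt
  rw [List.any_eq_true]
  constructor
  · intro h
    have hne : PySem.Set.inter (PySem.Set.ofList a.toList) (PySem.Set.ofList words.toList) ≠ [] := by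
      simpa using h
    obtain ⟨x, hx⟩ := List.exists_mem_of_ne_nil _ hne
    have hm := (PySem.Set.mem_inter _ _ _).mp hx
    exact ⟨x, (PySem.Set.mem_ofList _ _).mp hm.1,
      by simpa using (PySem.Set.mem_ofList _ _).mp hm.2⟩
  · rintro ⟨x, hx, hw⟩
    have hmem : x ∈ PySem.Set.inter (PySem.Set.ofList a.toList) (PySem.Set.ofList words.toList) :=
      (PySem.Set.mem_inter _ _ _).mpr ⟨(PySem.Set.mem_ofList _ _).mpr hx,
        (PySem.Set.mem_ofList _ _).mpr (by simpa using hw)⟩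
    simpa using List.ne_nil_of_mem hmem

-- ===== VERDICT (by name: the statement is the Claim_ definition above) =====
theorem uses_all_spec : Claim_equal_uses_all := by
  intro a words _
  unfold Spec_uses_all
  rw [uses_all_eq_any, uses_all_alt_eq_any]
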